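-- pv_equiv track=rewrite | github.com/edoardottt/programming-fundamentals | Workbook/Matrices/Matrices_4/program.py | es56
-- ===== SOURCE A (Python) =====
-- def es56(tabella):
--     '''
--     la funzione es56(tabella) che presa in input:
--     - una tabella  di interi (rappresentata tramite lista di liste in cui ciascuna lista e'
--     una riga della tabella) restituisce la lista con gli interi che occorrono il massimo
--     numero di volte nella tabella e modifica la tabella distruttivamente.
--     La lista restituita deve risultare  ordinata in modo crescente. Al termine della funzione,
--     nella tabella i numeri che occorrevano un numero massimo di volte devono risultare sostituiti dal
--     carattere '*'.
--     Ad esempio per tabella= [[3,2,1,3],[2,1,3,5],[1,3,2,1]] al termine della funzione la lista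
--     restituita e' [1,3] e la tabella diviene [[*,2,*,*],[2,*,*,5],[*,*,2,*]]
--     '''
--     diz={}
--     for y in range(len(tabella)):
--         for x in range(len(tabella[0])):
--             e = tabella[y][x]
--             if e not in diz: diz[e] = 1
--             else: diz[e]+=1
--     d = {}
--     for k,v in diz.items():
--         if v not in d: d[v] = [k]
--         else: d[v].append(k)
--     ls = d[max(d.keys())]
--     for y in range(len(tabella)):
--         for x in range(len(tabella[0])):
--             if tabella[y][x] in ls:
--                 tabella[y][x] = '*'
--     return sorted(ls)
-- ===== SOURCE B (Python) =====
-- def es56(tabella):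
--     # Sort-then-scan: flatten the table (first len(tabella[0]) cells of each row),
--     # sort, and sweep once over the sorted sequence keeping the current run length;
--     # the winners come out already in increasing order, no dictionary at all.
--     w = len(tabella[0])
--     s = sorted(e for row in tabella for e in row[:w])
--     winners, best, run, prev = [], 0, 0, None
--     for e in s:
--         run = run + 1 if e == prev else 1
--         prev = e
--         if run > best:
--             best, winners = run, [e]
--         elif run == best:
--             winners = winners + [e]
--     stars = set(winners)
--     for row in tabella:
--         for x in range(w):
--             if row[x] in stars:
--                 row[x] = '*'
--     return winners
-- ===== Notes on version B (the rewrite author's own statement) =====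
-- stated objective: alternative
-- what changed: B uses no dictionary at all: it flattens the table, sorts the multiset of cells, and finds the most frequent values in one run-length sweep over the sorted sequence (winners emerge already in ascending order), where A counts into a dict, inverts it into a frequency->keys dict, takes the bucket of the max key and sorts it.
import Mathlib
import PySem

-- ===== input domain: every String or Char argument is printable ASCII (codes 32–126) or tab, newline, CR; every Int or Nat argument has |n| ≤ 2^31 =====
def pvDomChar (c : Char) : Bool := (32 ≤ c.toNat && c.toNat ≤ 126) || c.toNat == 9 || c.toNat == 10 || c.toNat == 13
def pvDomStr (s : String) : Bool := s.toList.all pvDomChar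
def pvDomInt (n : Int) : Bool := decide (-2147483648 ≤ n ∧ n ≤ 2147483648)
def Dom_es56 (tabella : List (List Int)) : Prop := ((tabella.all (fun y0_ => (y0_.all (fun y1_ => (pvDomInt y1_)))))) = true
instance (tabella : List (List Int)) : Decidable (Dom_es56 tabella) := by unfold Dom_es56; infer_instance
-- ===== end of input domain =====

-- B drops both dictionaries of A: it sorts the flattened table and finds the most
-- frequent values by one run-length sweep over the sorted sequence (objective:
-- alternative). Python A mutates tabella in place (most-frequent entries become '*');
-- B performs the same mutation; the equivalence proved here is about the RETURN value
-- only (the mutated table holds the str '*' and is not representable as List (List Int)).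

-- ===== PORT A =====
-- The replacement loops of the Pythons only mutate tabella (writing '*') and do not
-- affect the returned value, which is computed before them; they are not ported.
def es56 (tabella : List (List Int)) : List Int :=
  let diz : PySem.Dict Int Int :=
    (PySem.List.pyRange 0 (tabella.length : Int) 1).foldl (fun diz y =>
      (PySem.List.pyRange 0 (((PySem.List.pyGetD tabella 0 []).length : Int)) 1).foldl (fun diz x =>
        let e := PySem.List.pyGetD (PySem.List.pyGetD tabella y []) x 0   -- in range under Pre_
        if diz.contains e = false then diz.insert e 1 else diz.modify e 0 (· + 1)) diz)
      PySem.Dict.empty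
  let d : PySem.Dict Int (List Int) :=
    diz.items.foldl (fun d kv =>
      if d.contains kv.2 = false then d.insert kv.2 [kv.1] else d.modify kv.2 [] (· ++ [kv.1]))
      PySem.Dict.empty
  match PySem.List.max? d.keys (fun k => k) with
  | none => []          -- max() of empty: ValueError, excluded by Pre_
  | some m => PySem.List.sorted (d.getD m []) (fun k => k) false   -- d[m]: m is a key of d

-- ===== PORT B =====
-- one step of B's sweep over the sorted cells; state = (winners, best, run, prev)
def pvStep (st : List Int × Int × Int × Option Int) (e : Int) : List Int × Int × Int × Option Int :=
  let run := if (some e == st.2.2.2) then st.2.2.1 + 1 else 1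
  if run > st.2.1 then ([e], run, run, some e)
  else if run == st.2.1 then (st.1 ++ [e], st.2.1, run, some e)
  else (st.1, st.2.1, run, some e)

def es56_alt (tabella : List (List Int)) : List Int :=
  let w := (PySem.List.pyGetD tabella 0 []).length      -- tabella[0]: nonempty under Pre_
  let s := PySem.List.sorted
    (tabella.flatMap (fun row => PySem.List.slice row none (some (w : Int))))  -- row[:w]
    (fun x => x) false
  (s.foldl pvStep ([], 0, 0, none)).1

-- ===== PRECONDITION & SPEC =====
-- Pre_ excludes exactly the inputs where Python A raises: an empty matrix or an empty
-- first row (ValueError from max() on an empty sequence) and a row shorter than row 0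
-- (IndexError).
def Pre_es56 (tabella : List (List Int)) : Prop :=
  tabella ≠ [] ∧ (tabella.getD 0 []).length ≠ 0 ∧
    ∀ row ∈ tabella, (tabella.getD 0 []).length ≤ row.length
instance (tabella : List (List Int)) : Decidable (Pre_es56 tabella) := by
  unfold Pre_es56; infer_instance
def pvWitness_es56 : List (List Int) := [[3, 2, 1, 3], [2, 1, 3, 5], [1, 3, 2, 1]]

def Spec_es56 (tabella : List (List Int)) (out : List Int) : Prop := out = es56_alt tabella
instance (tabella : List (List Int)) (out : List Int) : Decidable (Spec_es56 tabella out) := by unfold Spec_es56; infer_instance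

-- ===== CLAIM (what is proved, stated in full; the proofs are below) =====
def Claim_equal_es56 : Prop := ∀ (tabella : List (List Int)), Dom_es56 tabella → Pre_es56 tabella → Spec_es56 tabella (es56 tabella)

-- ===== LEMMAS AND PROOFS =====

-- the multiset of cells A counts over / B sorts: first w entries of every row
def pvFlat (tabella : List (List Int)) : List Int :=
  tabella.flatMap (fun row => row.take (PySem.List.pyGetD tabella 0 []).length)

-- the maximal multiplicity in p
def pvM (p : List Int) : Nat := ((p.map (fun x => p.count x)).max?).getD 0

-- the winners of p: first occurrences, in order, of the values of maximal multiplicity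
def pvW (p : List Int) : List Int :=
  (PySem.List.dedup p).filter (fun x => p.count x == pvM p)

theorem pv_count_le_M (p : List Int) (x : Int) (hx : x ∈ p) : p.count x ≤ pvM p := by
  cases hm : (p.map (fun y => p.count y)).max? with
  | none =>
      have h0 := List.max?_eq_none_iff.mp hm
      simp only [List.map_eq_nil_iff] at h0
      exact absurd hx (by simp [h0])
  | some m =>
      have h2 := List.max?_eq_some_iff.mp hm
      have hx' : p.count x ∈ p.map (fun y => p.count y) := List.mem_map_of_mem hx
      have := h2.2 _ hx'
      simpa [pvM, hm] using this

theorem pv_M_mem (p : List Int) (hp : p ≠ []) : ∃ x ∈ p, p.count x = pvM p := by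
  cases hm : (p.map (fun y => p.count y)).max? with
  | none =>
      have h0 := List.max?_eq_none_iff.mp hm
      simp only [List.map_eq_nil_iff] at h0
      exact absurd h0 hp
  | some m =>
      have h2 := List.max?_eq_some_iff.mp hm
      obtain ⟨x, hx, hc⟩ := List.mem_map.mp h2.1
      exact ⟨x, hx, by simp [pvM, hm, hc]⟩

theorem pv_M_eq (p : List Int) (b : Nat) (x : Int) (hx : x ∈ p) (hc : p.count x = b)
    (hb : ∀ y ∈ p, p.count y ≤ b) : pvM p = b := by
  obtain ⟨y, hy, hcy⟩ := pv_M_mem p (List.ne_nil_of_mem hx)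
  exact le_antisymm (hcy ▸ hb y hy) (hc ▸ pv_count_le_M p x hx)

theorem pv_count_append_e (p : List Int) (e y : Int) :
    (p ++ [e]).count y = p.count y + (if y = e then 1 else 0) := by
  by_cases h : y = e
  · subst h
    simp [List.count_append]
  · simp [List.count_append, h, Ne.symm h]

theorem pv_ofList_sublist (xs : List Int) : (PySem.Set.ofList xs).Sublist xs := by
  induction xs using List.reverseRecOn with
  | nil => simp [PySem.Set.ofList_nil]
  | append_singleton ys y ih =>
      rw [PySem.Set.ofList_append_singleton, PySem.Set.add_eq_ite]
      split_ifs with h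
      · exact ih.trans (List.sublist_append_left ys [y])
      · exact ih.append (List.Sublist.refl [y])

theorem pv_dedup_pairwise_lt (p : List Int) (hp : p.Pairwise (· ≤ ·)) :
    (PySem.List.dedup p).Pairwise (· < ·) := by
  have hsub : (PySem.List.dedup p).Sublist p := by
    rw [PySem.List.dedup_eq_ofList]; exact pv_ofList_sublist p
  have h1 : (PySem.List.dedup p).Pairwise (· ≤ ·) := hp.sublist hsub
  have h2 : (PySem.List.dedup p).Nodup := PySem.List.nodup_dedup p
  exact (h1.and h2).imp (fun h => lt_of_le_of_ne h.1 h.2)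

theorem pv_dedup_last (p : List Int) (a : Int) (hp : p.Pairwise (· ≤ ·))
    (ha : a ∈ p) (hm : ∀ x ∈ p, x ≤ a) :
    ∃ q, PySem.List.dedup p = q ++ [a] ∧ (∀ x ∈ q, x < a) := by
  have hlt := pv_dedup_pairwise_lt p hp
  have hane : PySem.List.dedup p ≠ [] :=
    List.ne_nil_of_mem ((PySem.List.mem_dedup p a).mpr ha)
  have hdec := List.dropLast_append_getLast hane
  set q := (PySem.List.dedup p).dropLast with hq
  set b := (PySem.List.dedup p).getLast hane with hb
  have hqb : (∀ x ∈ q, x < b) := by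
    have hlt' := hlt
    rw [← hdec, List.pairwise_append] at hlt'
    intro x hx
    exact hlt'.2.2 x hx b (by simp)
  have hba : b = a := by
    have hbp : b ∈ p := (PySem.List.mem_dedup p b).mp (by rw [← hdec]; simp)
    have h1 : b ≤ a := hm b hbp
    have h2 : a ∈ q ++ [b] := by rw [hdec]; exact (PySem.List.mem_dedup p a).mpr ha
    rcases List.mem_append.mp h2 with h | h
    · exact absurd (hqb a h) (not_lt.mpr h1)
    · simp at h; omega
  exact ⟨q, by rw [← hdec, hba], fun x hx => hba ▸ hqb x hx⟩

theorem pv_filter_single (l : List Int) (e : Int) (pr : Int → Bool) (hn : l.Nodup) (he : e ∈ l)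
    (hp : ∀ x ∈ l, (pr x = true ↔ x = e)) : l.filter pr = [e] := by
  induction l with
  | nil => cases he
  | cons h t ih =>
    rcases List.mem_cons.mp he with rfl | het
    · have hh : pr e = true := (hp e (by simp)).mpr rfl
      have ht : t.filter pr = [] := by
        rw [List.filter_eq_nil_iff]
        intro x hx hpx
        have hxe := (hp x (by simp [hx])).mp hpx
        subst hxe
        exact (List.nodup_cons.mp hn).1 hx
      simp [hh, ht]
    · have hne : h ≠ e := by
        rintro rfl
        exact (List.nodup_cons.mp hn).1 het
      have hh : pr h = false := by
        cases hph : pr h with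
        | true => exact absurd ((hp h (by simp)).mp hph) hne
        | false => rfl
      have := ih (List.nodup_cons.mp hn).2 het (fun x hx => hp x (by simp [hx]))
      simp [hh, this]

theorem pv_dedup_append_e (p : List Int) (e : Int) :
    PySem.List.dedup (p ++ [e])
      = if e ∈ p then PySem.List.dedup p else PySem.List.dedup p ++ [e] := by
  simp only [PySem.List.dedup_eq_ofList, PySem.Set.ofList_append_singleton,
    PySem.Set.add_eq_ite, PySem.Set.mem_ofList]

-- one step of the sweep, against the spec state of the processed sorted prefix p
theorem pv_step_one (p : List Int) (a e : Int) (hp : p.Pairwise (· ≤ ·))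
    (hl : p.getLast? = some a) (hm : ∀ x ∈ p, x ≤ a) (hae : a ≤ e) :
    pvStep (pvW p, (pvM p : Int), (p.count a : Int), some a) e
      = (pvW (p ++ [e]), (pvM (p ++ [e]) : Int), ((p ++ [e]).count e : Int), some e) := by
  have hpne : p ≠ [] := by intro h; subst h; simp at hl
  have hal : a ∈ p := List.mem_of_getLast? hl
  have hce : (p ++ [e]).count e = p.count e + 1 := by
    rw [pv_count_append_e]
    simp
  have hcount_ne : ∀ y, y ≠ e → (p ++ [e]).count y = p.count y := by
    intro y hy
    rw [pv_count_append_e]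
    simp [hy]
  have hmem_ne : ∀ y, y ∈ p ++ [e] → y ≠ e → y ∈ p := by
    intro y hy hne
    rcases List.mem_append.mp hy with h | h
    · exact h
    · simp at h; exact absurd h hne
  have hrun : (if ((some e == some a) = true) then ((p.count a : Int)) + 1 else 1)
      = ((p ++ [e]).count e : Int) := by
    by_cases h : e = a
    · subst h; simp [hce]
    · have he0 : p.count e = 0 := by
        rw [List.count_eq_zero]
        intro hmem
        exact h (le_antisymm (hm e hmem) hae)
      simp [h, hce, he0]
  set c := (p ++ [e]).count e with hc
  rcases Nat.lt_trichotomy (pvM p) c with hlt | heq | hgt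
  · -- run > best : new unique winner
    have hMa : pvM (p ++ [e]) = c := by
      apply pv_M_eq (p ++ [e]) c e (by simp) hc.symm
      intro y hy
      by_cases hye : y = e
      · subst hye; omega
      · rw [hcount_ne y hye]
        exact le_of_lt (lt_of_le_of_lt (pv_count_le_M p y (hmem_ne y hy hye)) hlt)
    have hWa : pvW (p ++ [e]) = [e] := by
      unfold pvW
      rw [pv_dedup_append_e]
      by_cases hep : e ∈ p
      · rw [if_pos hep]
        apply pv_filter_single _ e _ (PySem.List.nodup_dedup p)
          ((PySem.List.mem_dedup p e).mpr hep)
        intro x hx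
        have hxp : x ∈ p := (PySem.List.mem_dedup p x).mp hx
        constructor
        · intro hb
          by_contra hxe
          rw [hcount_ne x hxe, hMa] at hb
          have h1 := beq_iff_eq.mp hb
          have h2 := pv_count_le_M p x hxp
          omega
        · rintro rfl
          simp [hMa, ← hc]
      · rw [if_neg hep, List.filter_append]
        have h1 : (PySem.List.dedup p).filter
            (fun x => (p ++ [e]).count x == pvM (p ++ [e])) = [] := by
          rw [List.filter_eq_nil_iff]
          intro x hx hb
          have hxp : x ∈ p := (PySem.List.mem_dedup p x).mp hx
          have hxe : x ≠ e := by rintro rfl; exact hep hxp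
          rw [hcount_ne x hxe, hMa] at hb
          have h1 := beq_iff_eq.mp hb
          have h2 := pv_count_le_M p x hxp
          omega
        rw [h1]
        simp only [List.filter_cons, List.filter_nil, hMa, ← hc, beq_self_eq_true, if_true]
        simp
    rw [hMa, hWa]
    have hgt' : ((pvM p : Nat) : Int) < (c : Int) := by exact_mod_cast hlt
    simp only [pvStep, hrun]
    rw [if_pos hgt']
  · -- run == best : e joins the winners
    obtain ⟨y0, hy0, hcy0⟩ := pv_M_mem p hpne
    have hy0e : y0 ≠ e := by
      rintro rfl
      have := hce
      omega
    have hMa : pvM (p ++ [e]) = pvM p := by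
      apply pv_M_eq (p ++ [e]) (pvM p) y0 (List.mem_append_left _ hy0)
        (by rw [hcount_ne y0 hy0e]; exact hcy0)
      intro y hy
      by_cases hye : y = e
      · subst hye; omega
      · rw [hcount_ne y hye]
        exact pv_count_le_M p y (hmem_ne y hy hye)
    have hWa : pvW (p ++ [e]) = pvW p ++ [e] := by
      unfold pvW
      rw [pv_dedup_append_e]
      by_cases hep : e ∈ p
      · have hea : e = a := le_antisymm (hm e hep) hae
        obtain ⟨q, hq, hqlt⟩ := pv_dedup_last p a hp hal hm
        rw [if_pos hep, hq, List.filter_append, List.filter_append]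
        have h1 : ∀ x ∈ q, ((p ++ [e]).count x == pvM (p ++ [e]))
            = (p.count x == pvM p) := by
          intro x hx
          have hxe : x ≠ e := by rw [← hea] at hqlt; exact ne_of_lt (hqlt x hx)
          rw [hcount_ne x hxe, hMa]
        rw [List.filter_congr h1]
        have hpa : (p ++ [e]).count a = c := by rw [← hea]
        have hpold : p.count a = c - 1 := by
          rw [← hea]
          omega
        have h2 : ((p ++ [e]).count a == pvM (p ++ [e])) = true := by
          rw [hpa, hMa]
          simp [heq]
        have h3 : (p.count a == pvM p) = false := by
          rw [hpold]
          simp only [beq_eq_false_iff_ne, ne_eq]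
          omega
        simp only [List.filter_cons, List.filter_nil, h2, h3, if_true]
        simp [hea]
      · rw [if_neg hep, List.filter_append]
        have h1 : ∀ x ∈ PySem.List.dedup p, ((p ++ [e]).count x == pvM (p ++ [e]))
            = (p.count x == pvM p) := by
          intro x hx
          have hxp : x ∈ p := (PySem.List.mem_dedup p x).mp hx
          have hxe : x ≠ e := by rintro rfl; exact hep hxp
          rw [hcount_ne x hxe, hMa]
        rw [List.filter_congr h1]
        have h2 : ((p ++ [e]).count e == pvM (p ++ [e])) = true := by
          rw [hMa]
          simp only [beq_iff_eq]
          omega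
        rw [List.filter_cons, if_pos h2, List.filter_nil]
    rw [hMa, hWa]
    have h1 : ¬ (((pvM p : Nat) : Int) < (c : Int)) := by
      rw [heq]
      exact lt_irrefl _
    have h2 : (((c : Nat) : Int) == ((pvM p : Nat) : Int)) = true := by
      simp [heq]
    simp only [pvStep, hrun]
    rw [if_neg h1, if_pos h2]
  · -- run < best : winners unchanged
    obtain ⟨y0, hy0, hcy0⟩ := pv_M_mem p hpne
    have hy0e : y0 ≠ e := by
      rintro rfl
      have := hce
      omega
    have hMa : pvM (p ++ [e]) = pvM p := by
      apply pv_M_eq (p ++ [e]) (pvM p) y0 (List.mem_append_left _ hy0)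
        (by rw [hcount_ne y0 hy0e]; exact hcy0)
      intro y hy
      by_cases hye : y = e
      · subst hye; omega
      · rw [hcount_ne y hye]
        exact pv_count_le_M p y (hmem_ne y hy hye)
    have hWa : pvW (p ++ [e]) = pvW p := by
      unfold pvW
      rw [pv_dedup_append_e]
      by_cases hep : e ∈ p
      · rw [if_pos hep]
        apply List.filter_congr
        intro x hx
        by_cases hxe : x = e
        · have h1 : ((p ++ [e]).count e == pvM (p ++ [e])) = false := by
            rw [hMa]
            simp only [beq_eq_false_iff_ne, ne_eq]
            omega
          have h2 : (p.count e == pvM p) = false := by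
            simp only [beq_eq_false_iff_ne, ne_eq]
            omega
          rw [hxe, h1, h2]
        · rw [hcount_ne x hxe, hMa]
      · rw [if_neg hep, List.filter_append]
        have h1 : ∀ x ∈ PySem.List.dedup p, ((p ++ [e]).count x == pvM (p ++ [e]))
            = (p.count x == pvM p) := by
          intro x hx
          have hxp : x ∈ p := (PySem.List.mem_dedup p x).mp hx
          have hxe : x ≠ e := by rintro rfl; exact hep hxp
          rw [hcount_ne x hxe, hMa]
        rw [List.filter_congr h1]
        have h2 : ((p ++ [e]).count e == pvM (p ++ [e])) = false := by
          rw [hMa]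
          simp only [beq_eq_false_iff_ne, ne_eq]
          omega
        rw [List.filter_cons, if_neg (ne_true_of_eq_false h2), List.filter_nil, List.append_nil]
    rw [hMa, hWa]
    have h1 : ¬ (((pvM p : Nat) : Int) < (c : Int)) := by
      have : (c : Int) < ((pvM p : Nat) : Int) := by exact_mod_cast hgt
      omega
    have h2 : (((c : Nat) : Int) == ((pvM p : Nat) : Int)) = false := by
      simp only [beq_eq_false_iff_ne, ne_eq, Int.natCast_inj]
      omega
    simp only [pvStep, hrun]
    rw [if_neg h1, if_neg (by simp [h2])]

-- the sweep computes pvW on a sorted list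
theorem pv_go (s : List Int) : ∀ (p : List Int) (a : Int), p.Pairwise (· ≤ ·) →
    p.getLast? = some a → (∀ x ∈ p, x ≤ a) → (∀ x ∈ s, a ≤ x) → s.Pairwise (· ≤ ·) →
    (s.foldl pvStep (pvW p, (pvM p : Int), (p.count a : Int), some a)).1 = pvW (p ++ s) := by
  induction s with
  | nil =>
      intro p a _ _ _ _ _
      simp
  | cons e s' ih =>
      intro p a hp hl hm hs hss
      rw [List.foldl_cons, pv_step_one p a e hp hl hm (hs e (by simp))]
      have hp' : (p ++ [e]).Pairwise (· ≤ ·) := by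
        rw [List.pairwise_append]
        refine ⟨hp, by simp, fun x hx y hy => ?_⟩
        simp at hy
        rw [hy]
        exact (hm x hx).trans (hs e (by simp))
      have hcons := List.pairwise_cons.mp hss
      have := ih (p ++ [e]) e hp' (by simp)
        (fun x hx => by
          rcases List.mem_append.mp hx with h | h
          · exact (hm x h).trans (hs e (by simp))
          · simp at h; omega)
        hcons.1 hcons.2
      simpa using this

theorem pv_scan_eq (s : List Int) (hs : s.Pairwise (· ≤ ·)) :
    (s.foldl pvStep ([], 0, 0, none)).1 = pvW s := by
  cases s with
  | nil => rfl
  | cons e s' =>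
      rw [List.foldl_cons]
      have hM1 : pvM [e] = 1 := by simp [pvM]
      have h1 : pvStep ([], 0, 0, none) e
          = (pvW [e], (pvM [e] : Int), (([e] : List Int).count e : Int), some e) := by
        simp [pvStep, pvW, hM1, PySem.List.dedup_eq_ofList, PySem.Set.ofList]
      rw [h1]
      have hcons := List.pairwise_cons.mp hs
      have := pv_go s' [e] e (by simp) (by simp) (by simp) hcons.1 hcons.2
      simpa using this

-- ===== A-side: A's result is sorted(winners of pvFlat) =====

-- A's counting step (membership branch) is Counter's step (insert get+1).
theorem pv_step_count (d : PySem.Dict Int Int) (e : Int) :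
    (if d.contains e = false then d.insert e 1 else d.modify e 0 (· + 1))
      = d.insert e (d.getD e 0 + 1) := by
  by_cases h : d.contains e
  · simp [h, PySem.Dict.modify]
  · have hg : d.getD e 0 = 0 := by
      simp only [PySem.Dict.getD, PySem.Dict.get?]
      have : d.items.find? (fun p => p.1 == e) = none := by
        rw [List.find?_eq_none]
        intro p hp hb
        exact h (List.any_eq_true.mpr ⟨p, hp, hb⟩)
      simp [this]
    simp [h, hg]

-- A's inverse-dict step (membership branch) is one Dict.modify.
theorem pv_step_inv (d : PySem.Dict Int (List Int)) (kv : Int × Int) :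
    (if d.contains kv.2 = false then d.insert kv.2 [kv.1] else d.modify kv.2 [] (· ++ [kv.1]))
      = d.modify kv.2 [] (· ++ [kv.1]) := by
  by_cases h : d.contains kv.2
  · simp [h]
  · have hg : d.getD kv.2 [] = [] := by
      simp only [PySem.Dict.getD, PySem.Dict.get?]
      have : d.items.find? (fun p => p.1 == kv.2) = none := by
        rw [List.find?_eq_none]
        intro p hp hb
        exact h (List.any_eq_true.mpr ⟨p, hp, hb⟩)
      simp [this]
    simp [h, PySem.Dict.modify, hg]

-- max of a deduplicated Int list is max of the list.
theorem pv_max_ofList (xs : List Int) :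
    PySem.List.max? (PySem.Set.ofList xs) (fun v => v) = PySem.List.max? xs (fun v => v) := by
  cases h : PySem.List.max? xs (fun v => v) with
  | none =>
      have hx : xs = [] := (PySem.List.max?_eq_none_iff _ _).mp h
      subst hx; rfl
  | some m =>
      have hm : m ∈ xs := PySem.List.max?_mem h
      have hmax : ∀ y ∈ xs, y ≤ m := PySem.List.max?_isMax h
      cases h' : PySem.List.max? (PySem.Set.ofList xs) (fun v => v) with
      | none =>
          have : PySem.Set.ofList xs = [] := (PySem.List.max?_eq_none_iff _ _).mp h'
          have : m ∈ PySem.Set.ofList xs := (PySem.Set.mem_ofList _ _).mpr hm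
          simp_all
      | some m' =>
          have hm' : m' ∈ xs := (PySem.Set.mem_ofList _ _).mp (PySem.List.max?_mem h')
          have h1 : m' ≤ m := hmax _ hm'
          have h2 : m ≤ m' := PySem.List.max?_isMax h' m ((PySem.Set.mem_ofList _ _).mpr hm)
          have : m' = m := le_antisymm h1 h2
          rw [this]

-- A's counting dict is Counter(pvFlat tabella)  (under Pre_: rows at least w long)
theorem pv_diz_eq_counter (tabella : List (List Int))
    (hw : ∀ row ∈ tabella, (PySem.List.pyGetD tabella 0 []).length ≤ row.length) :
    ((PySem.List.pyRange 0 (tabella.length : Int) 1).foldl (fun diz y =>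
      (PySem.List.pyRange 0 (((PySem.List.pyGetD tabella 0 []).length : Int)) 1).foldl (fun diz x =>
        let e := PySem.List.pyGetD (PySem.List.pyGetD tabella y []) x 0
        if diz.contains e = false then diz.insert e 1 else diz.modify e 0 (· + 1)) diz)
      (PySem.Dict.empty : PySem.Dict Int Int))
    = PySem.Dict.counter (pvFlat tabella) := by
  rw [PySem.List.foldl_pyRange_zero_pyGetD' tabella ([] : List Int)
    (fun (diz : PySem.Dict Int Int) (row : List Int) =>
      (PySem.List.pyRange 0 (((PySem.List.pyGetD tabella 0 []).length : Int)) 1).foldl (fun diz x =>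
        let e := PySem.List.pyGetD row x 0
        if diz.contains e = false then diz.insert e 1 else diz.modify e 0 (· + 1)) diz)
    (PySem.Dict.empty : PySem.Dict Int Int)]
  rw [← PySem.Dict.foldl_insert_getD_add_one_eq_counter, pvFlat, List.foldl_flatMap]
  apply PySem.List.foldl_congr_mem
  intro acc row hr
  have hlen : (row.take (PySem.List.pyGetD tabella 0 []).length).length
      = (PySem.List.pyGetD tabella 0 []).length := by
    rw [List.length_take]
    exact Nat.min_eq_left (hw row hr)
  have h1 : (PySem.List.pyRange 0 (((PySem.List.pyGetD tabella 0 []).length : Int)) 1).foldl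
      (fun diz x =>
        let e := PySem.List.pyGetD row x 0
        if diz.contains e = false then diz.insert e 1 else diz.modify e 0 (· + 1)) acc
      = (PySem.List.pyRange 0 (((PySem.List.pyGetD tabella 0 []).length : Int)) 1).foldl
        (fun c x =>
          c.insert (PySem.List.pyGetD (row.take (PySem.List.pyGetD tabella 0 []).length) x 0)
            (c.getD (PySem.List.pyGetD (row.take (PySem.List.pyGetD tabella 0 []).length) x 0) 0 + 1)) acc := by
    apply PySem.List.foldl_congr_mem
    intro c j hj
    obtain ⟨hj0, hjw⟩ := PySem.List.mem_pyRange_one.mp hj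
    have hE : PySem.List.pyGetD row j 0
        = PySem.List.pyGetD (row.take (PySem.List.pyGetD tabella 0 []).length) j 0 := by
      rw [PySem.List.pyGetD_eq_getElem row 0 hj0
          (lt_of_lt_of_le hjw (by exact_mod_cast hw row hr)),
        PySem.List.pyGetD_eq_getElem (row.take (PySem.List.pyGetD tabella 0 []).length) 0 hj0
          (by rw [hlen]; exact hjw)]
      simp [List.getElem_take]
    simp only [hE, pv_step_count]
  rw [h1, show (((PySem.List.pyGetD tabella 0 []).length : Nat) : Int)
      = ((row.take (PySem.List.pyGetD tabella 0 []).length).length : Int) by rw [hlen]]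
  exact PySem.List.foldl_pyRange_zero_pyGetD' (row.take (PySem.List.pyGetD tabella 0 []).length) 0 (fun d x => d.insert x (d.getD x 0 + 1)) acc

-- the cast-beq on counts is the Nat beq
theorem pv_beq_cast (a b : Nat) : (((a : Nat) : Int) == ((b : Nat) : Int)) = (a == b) := by
  by_cases h : a = b <;> simp [h]

-- A's result, in closed form
theorem pv_A_closed (tabella : List (List Int)) (hpre : Pre_es56 tabella) :
    es56 tabella = PySem.List.sorted (pvW (pvFlat tabella)) (fun k => k) false := by
  have hw : ∀ row ∈ tabella, (PySem.List.pyGetD tabella 0 []).length ≤ row.length := by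
    intro row hr
    have h := hpre.2.2 row hr
    simpa [PySem.List.pyGetD_zero] using h
  have hflne : pvFlat tabella ≠ [] := by
    rcases tabella with _ | ⟨r0, rest⟩
    · exact absurd rfl hpre.1
    · have hw0 : (PySem.List.pyGetD (r0 :: rest) 0 []).length = r0.length := by
        simp [PySem.List.pyGetD_zero]
      have hlen0 : r0.length ≠ 0 := by
        have h := hpre.2.1
        simpa using h
      simp only [pvFlat, List.flatMap_cons, hw0, List.take_length]
      intro hcc
      rcases List.append_eq_nil_iff.mp hcc with ⟨h1, _⟩
      exact hlen0 (by rw [h1]; rfl)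
  simp only [es56]
  rw [pv_diz_eq_counter tabella hw]
  rw [PySem.List.foldl_congr_mem _ _ _ _ (fun d kv _ => pv_step_inv d kv)]
  set C := PySem.Dict.counter (pvFlat tabella) with hC
  have hswap : C.items.foldl (fun d kv => d.modify kv.2 [] (· ++ [kv.1]))
      (PySem.Dict.empty : PySem.Dict Int (List Int))
      = (C.items.map Prod.swap).foldl (fun d pr => d.modify pr.1 [] (· ++ [pr.2]))
          PySem.Dict.empty := by
    rw [List.foldl_map]
    rfl
  rw [hswap]
  have hkeys : ((C.items.map Prod.swap).foldl (fun d pr => d.modify pr.1 [] (· ++ [pr.2]))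
      (PySem.Dict.empty : PySem.Dict Int (List Int))).keys
      = PySem.Set.ofList C.values := by
    rw [PySem.Dict.keys_foldl_modify_key (C.items.map Prod.swap) (fun pr => pr.1) []
      (fun d pr v => v ++ [pr.2]) PySem.Dict.empty]
    simp only [List.map_map]
    rfl
  rw [hkeys, pv_max_ofList]
  set fl := pvFlat tabella with hfl
  have hvals : C.values = (PySem.Set.ofList fl).map (fun k => ((fl.count k : Nat) : Int)) := by
    rw [hC]
    simp [PySem.Dict.values, PySem.Dict.items_counter, List.map_map, Function.comp_def]
  obtain ⟨k0, hk0mem, hk0⟩ := pv_M_mem fl hflne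
  have hmax : PySem.List.max? C.values (fun v => v) = some ((pvM fl : Nat) : Int) := by
    cases hmm : PySem.List.max? C.values (fun v => v) with
    | none =>
        have h0 := (PySem.List.max?_eq_none_iff _ _).mp hmm
        rw [hvals] at h0
        have h1 := List.map_eq_nil_iff.mp h0
        have h2 : k0 ∈ PySem.Set.ofList fl := (PySem.Set.mem_ofList _ _).mpr hk0mem
        rw [h1] at h2
        cases h2
    | some m =>
        have hmem := PySem.List.max?_mem hmm
        have hbound := PySem.List.max?_isMax hmm
        rw [hvals] at hmem
        obtain ⟨k1, hk1, hk1e⟩ := List.mem_map.mp hmem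
        have hk1fl : k1 ∈ fl := (PySem.Set.mem_ofList _ _).mp hk1
        have hb2 : ∀ y ∈ fl, fl.count y ≤ fl.count k1 := by
          intro y hy
          have hyv : ((fl.count y : Nat) : Int) ∈ C.values := by
            rw [hvals]
            exact List.mem_map_of_mem ((PySem.Set.mem_ofList _ _).mpr hy)
          have h3 := hbound _ hyv
          rw [← hk1e] at h3
          exact_mod_cast h3
        have h4 : pvM fl = fl.count k1 := pv_M_eq fl (fl.count k1) k1 hk1fl rfl hb2
        rw [← hk1e, h4]
  rw [hmax]
  have hbucket : ((C.items.map Prod.swap).foldl (fun d pr => d.modify pr.1 [] (· ++ [pr.2]))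
      (PySem.Dict.empty : PySem.Dict Int (List Int))).getD ((pvM fl : Nat) : Int) []
      = pvW fl := by
    rw [PySem.Dict.getD_foldl_modify_append]
    rw [hC]
    simp only [PySem.Dict.items_counter, pvW, PySem.List.dedup_eq_ofList]
    simp only [List.map_map, List.filter_map, Function.comp_def, Prod.swap]
    simp [pv_beq_cast]
  simp only [hbucket]

-- B's result, in closed form
theorem pv_B_closed (tabella : List (List Int)) :
    es56_alt tabella = pvW (PySem.List.sorted (pvFlat tabella) (fun x => x) false) := by
  simp only [es56_alt, PySem.List.slice_to_natCast]
  rw [pv_scan_eq]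
  · rfl
  · exact PySem.List.sorted_pairwise _ _

-- the two closed forms agree
theorem pv_closed_eq (fl : List Int) :
    PySem.List.sorted (pvW fl) (fun k => k) false
      = pvW (PySem.List.sorted fl (fun x => x) false) := by
  by_cases hfl : fl = []
  · subst hfl
    rfl
  · set s := PySem.List.sorted fl (fun x => x) false with hsdef
    have hsp : s.Pairwise (· ≤ ·) := PySem.List.sorted_pairwise _ _
    have hperm : s.Perm fl := PySem.List.sorted_perm _ _ _
    have hcnt : ∀ y : Int, s.count y = fl.count y := fun y => hperm.count_eq y
    have hM : pvM s = pvM fl := by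
      obtain ⟨x0, hx0, hc0⟩ := pv_M_mem fl hfl
      apply pv_M_eq s (pvM fl) x0 (hperm.mem_iff.mpr hx0) (by rw [hcnt, hc0])
      intro y hy
      rw [hcnt]
      exact pv_count_le_M fl y (hperm.mem_iff.mp hy)
    have hWlt : (pvW s).Pairwise (· < ·) :=
      (pv_dedup_pairwise_lt s hsp).sublist List.filter_sublist
    have hmem : ∀ x, x ∈ pvW s ↔ x ∈ pvW fl := by
      intro x
      simp only [pvW, List.mem_filter, PySem.List.mem_dedup, beq_iff_eq, hM, hcnt,
        hperm.mem_iff]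
    have hnds : (pvW s).Nodup := (PySem.List.nodup_dedup s).filter _
    have hndf : (pvW fl).Nodup := (PySem.List.nodup_dedup fl).filter _
    have hperm2 : (pvW s).Perm (pvW fl) := (List.perm_ext_iff_of_nodup hnds hndf).mpr hmem
    exact PySem.List.sorted_eq_of_perm_of_pairwise_lt _ _ _ hperm2 hWlt

-- ===== VERDICT (by name: the statement is the Claim_ definition above) =====
theorem es56_spec : Claim_equal_es56 := by
  intro tabella _ hpre
  unfold Spec_es56
  rw [pv_A_closed tabella hpre, pv_B_closed tabella]
  exact pv_closed_eq (pvFlat tabella)
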